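-- pv_equiv track=rewrite | github.com/kamakauzy/graphql-hunter | lib/auth/flows.py | _tokenize_path
-- ===== SOURCE A (Python) =====
-- from typing import Any, Dict, Iterable, List, Mapping, Optional, Tuple
--
-- class FlowError(Exception):
--     pass
--
-- def _tokenize_path(path: str) -> List[str]:
--     # Supports dotted paths and simple [index] e.g. data.tokens[0].access_token
--     if not path:
--         return []
--     tokens: List[str] = []
--     buf = ""
--     i = 0
--     while i < len(path):
--         c = path[i]
--         if c == ".":
--             if buf:
--                 tokens.append(buf)
--                 buf = ""
--             i += 1
--             continue
--         if c == "[":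
--             if buf:
--                 tokens.append(buf)
--                 buf = ""
--             j = path.find("]", i)
--             if j == -1:
--                 raise FlowError(f"Invalid json path (missing ']'): {path}")
--             tokens.append(path[i : j + 1])  # include brackets
--             i = j + 1
--             continue
--         buf += c
--         i += 1
--     if buf:
--         tokens.append(buf)
--     return tokens
-- ===== SOURCE B (Python) =====
-- from typing import List
--
-- class FlowError(Exception):
--     pass
--
-- def _tokenize_path(path: str) -> List[str]:
--     # Chunk-based scan: jump to each '[' with str.find, split the plain run
--     # before it on '.', and copy the bracket group verbatim.
--     tokens: List[str] = []
--     pos, n = 0, len(path)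
--     while pos < n:
--         lb = path.find("[", pos)
--         chunk = path[pos:] if lb == -1 else path[pos:lb]
--         tokens += [t for t in chunk.split(".") if t]
--         pos += len(chunk)
--         if pos < n:  # path[pos] == "["
--             rb = path.find("]", pos)
--             if rb == -1:
--                 raise FlowError(f"Invalid json path (missing ']'): {path}")
--             tokens.append(path[pos : rb + 1])
--             pos = rb + 1
--     return tokens
-- ===== Notes on version B (the rewrite author's own statement) =====
-- stated objective: faster
-- what changed: Replaced A's per-character while loop with a string buffer by a chunk scan: str.find jumps to each '[', the plain chunk before it is split on '.' with str.split (empty pieces dropped), and the bracket group is copied verbatim.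
import Mathlib
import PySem

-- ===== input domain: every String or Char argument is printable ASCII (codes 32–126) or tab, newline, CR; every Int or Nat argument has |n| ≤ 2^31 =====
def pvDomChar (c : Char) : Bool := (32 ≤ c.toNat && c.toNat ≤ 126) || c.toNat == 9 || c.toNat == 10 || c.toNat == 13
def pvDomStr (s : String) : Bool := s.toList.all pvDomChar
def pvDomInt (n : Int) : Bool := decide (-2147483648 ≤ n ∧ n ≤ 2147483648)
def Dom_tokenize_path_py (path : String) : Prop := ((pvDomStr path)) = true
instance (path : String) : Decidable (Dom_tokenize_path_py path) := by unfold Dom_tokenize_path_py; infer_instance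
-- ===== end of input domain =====

-- B replaces A's per-character buffer loop by a chunk scan (find next '[', split the
-- plain chunk on '.', copy the bracket group verbatim); same return value on Pre_.

-- ===== PORT A =====
-- A's while loop over characters, with index i replaced by the remaining suffix;
-- `path.find("]", i)` becomes takeWhile/dropWhile on the suffix (path[i] = '[' ≠ ']',
-- so searching from i equals searching from i+1). Where Python raises FlowError
-- (no ']' found) the port returns the tokens accumulated so far; Pre_ excludes that.
def pyTokLoopA : List Char → List Char → List String → List String
  | [], buf, tokens => if buf ≠ [] then tokens ++ [String.ofList buf] else tokens
  | c :: rest, buf, tokens =>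
    if c = '.' then
      pyTokLoopA rest [] (if buf ≠ [] then tokens ++ [String.ofList buf] else tokens)
    else if c = '[' then
      let tokens' := if buf ≠ [] then tokens ++ [String.ofList buf] else tokens
      if ']' ∈ rest then
        pyTokLoopA ((rest.dropWhile (· ≠ ']')).tail) []
          (tokens' ++ [String.ofList ('[' :: rest.takeWhile (· ≠ ']') ++ [']'])])
      else tokens'  -- Python: raise FlowError (outside Pre_)
    else
      pyTokLoopA rest (buf ++ [c]) tokens
  termination_by cs _ _ => cs.length
  decreasing_by
    · simp
    · have key : ∀ (l : List Char) (p : Char → Bool), (l.dropWhile p).tail.length ≤ l.length :=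
        fun l p => le_trans (by simp [List.length_tail]) (List.length_dropWhile_le p l)
      exact lt_of_le_of_lt (key _ _) (by simp)
    · simp

-- Python's `if not path: return []` early exit, then the while loop
def tokenize_path_py (path : String) : List String :=
  match path.toList with
  | [] => []
  | c :: cs => pyTokLoopA (c :: cs) [] []

-- ===== PORT B =====
-- B's while loop: each round takes the plain chunk up to the next '[' (str.find),
-- appends the nonempty pieces of chunk.split('.') (PySem.Chars.splitOn), then the
-- bracket group path[pos:rb+1]. Where Python raises FlowError the port returns the
-- tokens accumulated so far; Pre_ excludes that.
def pyTokLoopB : List Char → List String → List String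
  | cs, acc =>
    match hcs : cs with
    | [] => acc
    | _ :: _ =>
      let chunk := cs.takeWhile (· ≠ '[')
      let acc' := acc ++ ((PySem.Chars.splitOn chunk ['.']).filter (· ≠ [])).map String.ofList
      match hr : cs.dropWhile (· ≠ '[') with
      | [] => acc'
      | _ :: r =>  -- here path[pos] = '['
        if ']' ∈ r then
          pyTokLoopB ((r.dropWhile (· ≠ ']')).tail)
            (acc' ++ [String.ofList ('[' :: r.takeWhile (· ≠ ']') ++ [']'])])
        else acc'  -- Python: raise FlowError (outside Pre_)
  termination_by cs _ => cs.length
  decreasing_by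
    have key : ∀ (l : List Char) (p : Char → Bool), (l.dropWhile p).tail.length ≤ l.length :=
      fun l p => le_trans (by simp [List.length_tail]) (List.length_dropWhile_le p l)
    have h0 : ∀ (l : List Char) (p : Char → Bool) (c : Char) (t : List Char),
        l.dropWhile p = c :: t → t.length < l.length := by
      intro l p c t h
      have := List.length_dropWhile_le p l
      rw [h] at this; simpa using Nat.lt_of_lt_of_le (Nat.lt_succ_self _) this
    exact lt_of_le_of_lt (key _ _) (h0 _ _ _ _ (hcs ▸ hr))

def tokenize_path_py_alt (path : String) : List String :=
  pyTokLoopB path.toList []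

-- ===== PRECONDITION & SPEC =====
-- Pre_ excludes exactly the paths on which A raises FlowError: those with a '['
-- after the last ']' (i.e. a '[' with no ']' anywhere at or after it).
def Pre_tokenize_path_py (path : String) : Prop :=
  '[' ∉ path.toList.reverse.takeWhile (· ≠ ']')
instance (path : String) : Decidable (Pre_tokenize_path_py path) := by
  unfold Pre_tokenize_path_py; infer_instance

def pvWitness_tokenize_path_py : String := "data.tokens[0].access_token"

def Spec_tokenize_path_py (path : String) (out : List String) : Prop := out = tokenize_path_py_alt path
instance (path : String) (out : List String) : Decidable (Spec_tokenize_path_py path out) := by unfold Spec_tokenize_path_py; infer_instance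

-- ===== CLAIM (what is proved, stated in full; the proofs are below) =====
def Claim_equal_tokenize_path_py : Prop := ∀ (path : String), Dom_tokenize_path_py path → Pre_tokenize_path_py path → Spec_tokenize_path_py path (tokenize_path_py path)

-- ===== LEMMAS AND PROOFS =====

-- nonempty pieces of splitting on '.', carrying the current piece `buf`
def dt : List Char → List Char → List String
  | [], buf => if buf ≠ [] then [String.ofList buf] else []
  | c :: rest, buf =>
    if c = '.' then (if buf ≠ [] then [String.ofList buf] else []) ++ dt rest []
    else dt rest (buf ++ [c])

-- all pieces of splitting on '.' (mirrors PySem.Chars.splitOn.go for sep = ".")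
def pieces : List Char → List Char → List (List Char)
  | pre, [] => [pre]
  | pre, c :: rest =>
    if c = '.' then pre :: pieces [] rest else pieces (pre ++ [c]) rest


theorem go_eq_pieces : ∀ (fuel : Nat) (l cur : List Char) (acc : List (List Char)),
    l.length < fuel →
    PySem.Chars.splitOn.go ['.'] fuel l cur acc = acc.reverse ++ pieces cur.reverse l := by
  intro fuel
  induction fuel with
  | zero => intro l cur acc h; omega
  | succ n ih =>
    intro l cur acc h
    match l with
    | [] => simp [PySem.Chars.splitOn.go, pieces]
    | c :: rest =>
      rw [PySem.Chars.splitOn.go]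
      by_cases hc : c = '.'
      · subst hc
        simp only [List.isPrefixOf, BEq.rfl, Bool.and_eq_true]
        rw [if_pos (by simp)]
        rw [ih _ _ _ (by simp at h ⊢; omega)]
        simp [pieces]
      · rw [if_neg (by simp [List.isPrefixOf]; exact fun h' => absurd h'.symm hc)]
        rw [ih _ _ _ (by simp at h ⊢; omega)]
        simp [pieces, hc]
theorem splitOn_eq_pieces (l : List Char) :
    PySem.Chars.splitOn l ['.'] = pieces [] l := by
  rw [PySem.Chars.splitOn, go_eq_pieces _ _ _ _ (by omega)]; simp

theorem pieces_filter_eq_dt : ∀ (l pre : List Char),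
    ((pieces pre l).filter (· ≠ [])).map String.ofList = dt l pre := by
  intro l
  induction l with
  | nil => intro pre; by_cases h : pre = [] <;> simp [pieces, dt, h]
  | cons c rest ih =>
    intro pre
    by_cases hc : c = '.'
    · subst hc
      by_cases h : pre = [] <;> simpa [pieces, dt, h] using ih []
    · simpa [pieces, dt, hc] using ih (pre ++ [c])

theorem aLoop_bracket (r : List Char) (buf : List Char) (tokens : List String) :
    pyTokLoopA ('[' :: r) buf tokens =
      pyTokLoopA ('[' :: r) [] (tokens ++ (if buf ≠ [] then [String.ofList buf] else [])) := by
  rw [pyTokLoopA, pyTokLoopA]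
  by_cases h : buf = [] <;> by_cases hr : ']' ∈ r <;> simp [h, hr]

theorem aLoop_plain : ∀ (chunk : List Char) (buf : List Char) (tokens : List String)
    (rest : List Char), (∀ c ∈ chunk, c ≠ '[') → (rest = [] ∨ ∃ r, rest = '[' :: r) →
    pyTokLoopA (chunk ++ rest) buf tokens =
      pyTokLoopA rest [] (tokens ++ dt chunk buf) := by
  intro chunk
  induction chunk with
  | nil =>
    intro buf tokens rest _ hrest
    rcases hrest with h | ⟨r, h⟩ <;> subst h
    · by_cases h : buf = [] <;> simp [pyTokLoopA, dt, h]
    · rw [List.nil_append, aLoop_bracket]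
      have hdt : dt [] buf = (if buf ≠ [] then [String.ofList buf] else []) := by
        by_cases h : buf = [] <;> simp [dt, h]
      rw [hdt]
  | cons c rest ih =>
    intro buf tokens rest' hch hrest
    have hc : c ≠ '[' := hch c (by simp)
    by_cases hdot : c = '.'
    · subst hdot
      rw [List.cons_append, pyTokLoopA]
      simp only [reduceIte]
      rw [ih _ _ _ (fun x hx => hch x (by simp [hx])) hrest]
      by_cases h : buf = [] <;> simp [dt, h]
    · rw [List.cons_append, pyTokLoopA]
      rw [if_neg hdot, if_neg hc]
      rw [ih _ _ _ (fun x hx => hch x (by simp [hx])) hrest]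
      simp [dt, hdot]
theorem dropWhile_head_false : ∀ (l : List Char) (p : Char → Bool) (c : Char) (r : List Char),
    l.dropWhile p = c :: r → p c = false := by
  intro l p
  induction l with
  | nil => intro c r h; simp [List.dropWhile] at h
  | cons a t ih =>
    intro c r h
    by_cases hp : p a
    · rw [List.dropWhile_cons_of_pos hp] at h; exact ih c r h
    · rw [List.dropWhile_cons_of_neg hp] at h
      cases h; simpa using hp


theorem aLoop_lbracket (r : List Char) (tokens : List String) :
    pyTokLoopA ('[' :: r) [] tokens =
      if ']' ∈ r then
        pyTokLoopA ((r.dropWhile (· ≠ ']')).tail) []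
          (tokens ++ [String.ofList ('[' :: r.takeWhile (· ≠ ']') ++ [']'])])
      else tokens := by
  rw [pyTokLoopA]
  simp

theorem loop_eq : ∀ (n : Nat) (cs : List Char), cs.length ≤ n → ∀ (tokens : List String),
    pyTokLoopA cs [] tokens = pyTokLoopB cs tokens := by
  intro n
  induction n with
  | zero =>
    intro cs h tokens
    have : cs = [] := by cases cs <;> simp_all
    subst this
    simp [pyTokLoopA, pyTokLoopB]
  | succ n ih =>
    intro cs hlen tokens
    match hcs : cs with
    | [] => simp [pyTokLoopA, pyTokLoopB]
    | a :: cs' =>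
      have hsplit := List.takeWhile_append_dropWhile (p := (· ≠ '[')) (l := a :: cs')
      have hchunk : ∀ x ∈ (a :: cs').takeWhile (· ≠ '['), x ≠ '[' := by
        intro x hx
        have := List.mem_takeWhile_imp hx
        simpa using this
      rw [pyTokLoopB, splitOn_eq_pieces, pieces_filter_eq_dt]
      split
      · next h =>
        conv_lhs => rw [← hsplit, h]
        rw [aLoop_plain _ _ _ _ hchunk (Or.inl rfl)]
        simp [pyTokLoopA]
      · next d r h =>
        have hd : d = '[' := by
          have := dropWhile_head_false _ _ _ _ h
          simpa using this
        subst hd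
        conv_lhs => rw [← hsplit, h]
        rw [aLoop_plain _ _ _ _ hchunk (Or.inr ⟨r, rfl⟩), aLoop_lbracket]
        split_ifs with hb
        · apply ih
          have h1 : ((a :: cs').dropWhile (· ≠ '[')).length ≤ cs'.length + 1 := by
            simpa using List.length_dropWhile_le _ _
          rw [h] at h1
          have h2 := List.length_dropWhile_le (p := (· ≠ ']')) r
          have h3 : ((r.dropWhile (· ≠ ']')).tail).length = (r.dropWhile (· ≠ ']')).length - 1 := List.length_tail
          simp only [List.length_cons] at h1 hlen
          omega
        · rfl

-- ===== VERDICT (by name: the statement is the Claim_ definition above) =====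
theorem tokenize_path_py_spec : Claim_equal_tokenize_path_py := by
  intro path _ _
  unfold Spec_tokenize_path_py tokenize_path_py tokenize_path_py_alt
  match h : path.toList with
  | [] => simp [pyTokLoopB]
  | c :: cs => exact loop_eq (c :: cs).length _ le_rfl _
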